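-- pv_equiv track=rewrite | github.com/jhunkeler/jwst | setup.py | sanitize_package_name
-- ===== SOURCE A (Python) =====
-- def sanitize_package_name(package):
--     '''Sanitize package name by:
--         - Converting dashes to underscores
--         - Omitting version constraints
--     '''
--     package = package.replace('-', '_')
--
--     constraints = ' !<>=,'
--     for char in constraints:
--         pos = package.find(char)
--         if pos >= 0:
--             package = package[0:pos]
--     return package
-- ===== SOURCE B (Python) =====
-- def sanitize_package_name(package):
--     '''Sanitize package name by:
--         - Converting dashes to underscores
--         - Omitting version constraints
--     '''
--     package = package.replace('-', '_')
--     out = []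
--     for ch in package:
--         if ch in ' !<>=,':
--             break
--         out.append(ch)
--     return ''.join(out)
-- ===== Notes on version B (the rewrite author's own statement) =====
-- stated objective: idiomatic
-- what changed: Replaces six sequential find-and-truncate passes over the fixed constraint set by a single left-to-right scan that collects characters until the first delimiter.
import Mathlib
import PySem

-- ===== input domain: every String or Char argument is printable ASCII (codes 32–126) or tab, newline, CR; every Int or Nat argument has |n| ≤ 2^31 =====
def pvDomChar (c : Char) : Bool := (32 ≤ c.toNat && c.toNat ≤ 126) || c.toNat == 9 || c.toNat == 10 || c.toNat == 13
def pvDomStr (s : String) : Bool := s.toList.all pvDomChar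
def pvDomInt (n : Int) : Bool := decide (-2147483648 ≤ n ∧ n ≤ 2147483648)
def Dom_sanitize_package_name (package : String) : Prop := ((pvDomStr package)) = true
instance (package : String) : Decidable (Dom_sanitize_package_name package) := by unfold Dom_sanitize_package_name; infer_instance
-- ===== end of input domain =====

-- B replaces A's six sequential find-and-truncate passes by one left-to-right scan
-- that collects characters up to the first constraint character (objective: idiomatic).

-- ===== PORT A =====
-- A: dash→underscore, then for each char of ' !<>=,' find it and truncate at its position.
def sanitize_package_name (package : String) : String :=
  let package := PySem.Str.replace package "-" "_"
  (" !<>=,".toList).foldl (fun pkg ch =>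
    let pos := PySem.Str.find pkg (String.ofList [ch])
    if pos ≥ 0 then PySem.Str.slice pkg (some 0) (some pos) else pkg) package

-- ===== PORT B =====
-- B: dash→underscore, then one scan collecting the prefix before the first constraint char.
def pvScanB : List Char → List Char
  | [] => []
  | c :: rest => if c ∈ " !<>=,".toList then [] else c :: pvScanB rest

def sanitize_package_name_alt (package : String) : String :=
  String.ofList (pvScanB (PySem.Str.replace package "-" "_").toList)

-- ===== PRECONDITION & SPEC =====
def Spec_sanitize_package_name (package : String) (out : String) : Prop := out = sanitize_package_name_alt package
instance (package : String) (out : String) : Decidable (Spec_sanitize_package_name package out) := by unfold Spec_sanitize_package_name; infer_instance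

-- ===== CLAIM (what is proved, stated in full; the proofs are below) =====
def Claim_equal_sanitize_package_name : Prop := ∀ (package : String), Dom_sanitize_package_name package → Spec_sanitize_package_name package (sanitize_package_name package)

-- ===== LEMMAS AND PROOFS =====

theorem pv_singleton_prefix (c : Char) (m : List Char) : [c] <+: m ↔ m.head? = some c := by
  cases m with
  | nil => simp
  | cons x xs => simp [List.cons_prefix_cons, eq_comm]

-- take n = takeWhile (· != c) when position n holds the first occurrence of c
theorem pv_take_eq_takeWhile {c : Char} : ∀ {l : List Char} {n : Nat}
    (hn : n < l.length), l[n]'hn = c → (∀ i, i < n → l[i]? ≠ some c) →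
    l.take n = l.takeWhile (· != c)
  | [], n, hn, _, _ => by simp at hn
  | x :: xs, 0, _, hc, _ => by subst hc; simp
  | x :: xs, n + 1, hn, hc, hmin => by
    have hx : (x != c) = true := by
      by_contra h
      have hxc : x = c := by simpa using h
      exact hmin 0 (Nat.succ_pos n) (by simp [hxc])
    have ih := pv_take_eq_takeWhile (l := xs) (n := n)
      (by simpa using hn) (by simpa using hc)
      (fun i hi h => hmin (i + 1) (by omega) (by simpa using h))
    simp [List.take_succ_cons, hx, ih]

-- one pass of A's loop truncates at the first occurrence of c
theorem pv_stepA (l : List Char) (c : Char) :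
    (if PySem.Chars.find l [c] ≥ 0
      then PySem.List.slice l (some 0) (some (PySem.Chars.find l [c]))
      else l) = l.takeWhile (· != c) := by
  by_cases h : PySem.Chars.find l [c] ≥ 0
  · obtain ⟨hpre, hmin⟩ := PySem.Chars.find_spec (s := l) (sub := [c]) h
    set n := (PySem.Chars.find l [c]).toNat with hn
    rw [pv_singleton_prefix, List.head?_drop] at hpre
    obtain ⟨hnl, hget⟩ := List.getElem?_eq_some_iff.mp hpre
    have hm : ∀ i, i < n → l[i]? ≠ some c := by
      intro i hi hsome
      exact hmin i hi (by rw [pv_singleton_prefix, List.head?_drop]; exact hsome)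
    have hslice : PySem.List.slice l (some 0) (some (PySem.Chars.find l [c])) = l.take n := by
      rw [PySem.List.slice_zero_start, PySem.List.slice_to _ h]
    rw [if_pos h, hslice, pv_take_eq_takeWhile hnl hget hm]
  · rw [if_neg h]
    have : PySem.Chars.find l [c] = -1 := by
      have := PySem.Chars.neg_one_le_find (s := l) (sub := [c])
      omega
    have hninf : ¬ [c] <:+: l := (PySem.Chars.find_eq_neg_one_iff _ _).mp this
    have hnm : c ∉ l := fun hm => hninf ((List.singleton_infix_iff c l).mpr hm)
    rw [eq_comm, List.takeWhile_eq_self_iff]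
    intro a ha
    by_contra hba
    have : a = c := by simpa using hba
    exact hnm (this ▸ ha)

-- A's whole loop, at the character-list level, is takeWhile over the constraint set
theorem pv_foldA : ∀ (ds : List Char) (s : String),
    (ds.foldl (fun pkg ch =>
       let pos := PySem.Str.find pkg (String.ofList [ch])
       if pos ≥ 0 then PySem.Str.slice pkg (some 0) (some pos) else pkg) s).toList
    = s.toList.takeWhile (fun x => ds.all (x != ·))
  | [], s => by
    simp only [List.foldl_nil, List.all_nil]
    exact (List.takeWhile_eq_self_iff.mpr (by simp)).symm
  | d :: ds, s => by
    rw [List.foldl_cons, pv_foldA ds]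
    have hstep : (if PySem.Str.find s (String.ofList [d]) ≥ 0
        then PySem.Str.slice s (some 0) (some (PySem.Str.find s (String.ofList [d])))
        else s).toList = s.toList.takeWhile (· != d) := by
      have hfind : PySem.Str.find s (String.ofList [d]) = PySem.Chars.find s.toList [d] := by
        simp
      rw [hfind]
      by_cases h : PySem.Chars.find s.toList [d] ≥ 0
      · rw [if_pos h]
        have := pv_stepA s.toList d
        rw [if_pos h] at this
        simpa using this
      · rw [if_neg h]
        have := pv_stepA s.toList d
        rw [if_neg h] at this
        simpa using this
    rw [hstep, List.takeWhile_takeWhile]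
    congr 1
    funext x
    rw [Bool.eq_iff_iff]
    simp [List.all_eq_true, and_comm]

-- B's scan is the same takeWhile
theorem pv_scanB_eq : ∀ l : List Char,
    pvScanB l = l.takeWhile (fun x => (" !<>=,".toList).all (x != ·))
  | [] => rfl
  | c :: rest => by
    by_cases hc : c ∈ " !<>=,".toList
    · have hall : (" !<>=,".toList).all (c != ·) = false := by
        refine List.all_eq_false.mpr ⟨c, hc, by simp⟩
      unfold pvScanB
      rw [if_pos hc]
      simp only [List.takeWhile_cons, hall]
      simp
    · have hall : (" !<>=,".toList).all (c != ·) = true := by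
        refine List.all_eq_true.mpr (fun d hd => ?_)
        simp only [bne_iff_ne, ne_eq]
        intro h; exact hc (h ▸ hd)
      unfold pvScanB
      rw [if_neg hc]
      simp only [List.takeWhile_cons, hall]
      simp [pv_scanB_eq rest]

-- ===== VERDICT (by name: the statement is the Claim_ definition above) =====
theorem sanitize_package_name_spec : Claim_equal_sanitize_package_name := by
  intro package _
  unfold Spec_sanitize_package_name sanitize_package_name sanitize_package_name_alt
  apply String.toList_inj.mp
  rw [pv_foldA, pv_scanB_eq]
  simp
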